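-- pv_equiv track=rewrite | github.com/mohamedbejaoui97-rgb/martech-audit-tool | cli/deep/wizard_gads.py | _check_missing_funnel_events
-- ===== SOURCE A (Python) =====
-- ECOMMERCE_FUNNEL = {
--     "upper": ["view_item", "view_item_list"],
--     "mid": ["add_to_cart", "begin_checkout", "add_payment_info"],
--     "bottom": ["purchase"],
-- }
--
-- LEAD_GEN_FUNNEL = {
--     "upper": ["page_view", "view_content"],
--     "mid": ["form_start", "phone_call"],
--     "bottom": ["generate_lead", "contact", "sign_up"],
-- }
--
-- def _check_missing_funnel_events(actions, business_type):
--     """Flag missing mid-funnel and upper-funnel events (FR24)."""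
--     if business_type == "ecommerce":
--         funnel = ECOMMERCE_FUNNEL
--     elif business_type == "lead_gen":
--         funnel = LEAD_GEN_FUNNEL
--     else:  # both
--         funnel = {
--             "upper": ECOMMERCE_FUNNEL["upper"] + LEAD_GEN_FUNNEL["upper"],
--             "mid": ECOMMERCE_FUNNEL["mid"] + LEAD_GEN_FUNNEL["mid"],
--             "bottom": ECOMMERCE_FUNNEL["bottom"] + LEAD_GEN_FUNNEL["bottom"],
--         }
--
--     action_names_lower = [a["name"].lower().replace(" ", "_") for a in actions]
--
--     missing = {"upper": [], "mid": [], "bottom": []}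
--     for level, events in funnel.items():
--         for event in events:
--             if not any(event in name for name in action_names_lower):
--                 missing[level].append(event)
--
--     return missing
-- ===== SOURCE B (Python) =====
-- ECOMMERCE_FUNNEL = {
--     "upper": ["view_item", "view_item_list"],
--     "mid": ["add_to_cart", "begin_checkout", "add_payment_info"],
--     "bottom": ["purchase"],
-- }
--
-- LEAD_GEN_FUNNEL = {
--     "upper": ["page_view", "view_content"],
--     "mid": ["form_start", "phone_call"],
--     "bottom": ["generate_lead", "contact", "sign_up"],
-- }
--
-- def _check_missing_funnel_events(actions, business_type):
--     """Flag missing funnel events: one pass over the actions builds a 'present'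
--     index of matched events; a final pass filters each level against it."""
--     if business_type == "ecommerce":
--         funnel = ECOMMERCE_FUNNEL
--     elif business_type == "lead_gen":
--         funnel = LEAD_GEN_FUNNEL
--     else:  # both
--         funnel = {k: ECOMMERCE_FUNNEL[k] + LEAD_GEN_FUNNEL[k]
--                   for k in ("upper", "mid", "bottom")}
--
--     present = set()
--     for a in actions:
--         name = a["name"].lower().replace(" ", "_")
--         for events in funnel.values():
--             for e in events:
--                 if e in name:
--                     present.add(e)
--
--     return {level: [e for e in events if e not in present]
--             for level, events in funnel.items()}
-- ===== Notes on version B (the rewrite author's own statement) =====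
-- stated objective: alternative
-- what changed: A loops events-outer/names-inner, re-scanning the whole normalised action-name list once per funnel event via any() and appending to a missing dict; B inverts the loops: a single pass over the actions (each name normalised once) builds a 'present' set of matched events, then a separate filtering pass over the funnel keeps the events absent from the set.
import Mathlib
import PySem

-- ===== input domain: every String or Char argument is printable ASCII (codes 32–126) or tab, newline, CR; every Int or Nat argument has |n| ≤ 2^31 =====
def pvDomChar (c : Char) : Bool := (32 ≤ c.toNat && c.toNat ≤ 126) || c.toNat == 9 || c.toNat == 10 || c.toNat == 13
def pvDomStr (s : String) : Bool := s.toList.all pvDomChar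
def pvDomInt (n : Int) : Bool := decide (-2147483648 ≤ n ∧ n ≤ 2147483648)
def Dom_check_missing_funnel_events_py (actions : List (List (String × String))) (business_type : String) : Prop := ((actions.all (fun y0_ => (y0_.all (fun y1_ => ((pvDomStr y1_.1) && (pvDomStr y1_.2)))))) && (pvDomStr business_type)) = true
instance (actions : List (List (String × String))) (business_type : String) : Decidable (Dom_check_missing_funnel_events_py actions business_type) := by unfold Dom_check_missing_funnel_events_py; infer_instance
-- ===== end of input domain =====

-- B inverts A's loops: instead of scanning all action names once per funnel event
-- (events outer, any() inner) and appending into a missing-dict, B makes one pass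
-- over the actions building a 'present' set of matched events and then filters each
-- funnel level against that set; objective: alternative decomposition.

-- ===== PORT A =====
-- module constants ECOMMERCE_FUNNEL / LEAD_GEN_FUNNEL (dicts → assoc lists in insertion order)
def pvEcomFunnel : List (String × List String) :=
  [("upper", ["view_item", "view_item_list"]),
   ("mid", ["add_to_cart", "begin_checkout", "add_payment_info"]),
   ("bottom", ["purchase"])]

def pvLeadGenFunnel : List (String × List String) :=
  [("upper", ["page_view", "view_content"]),
   ("mid", ["form_start", "phone_call"]),
   ("bottom", ["generate_lead", "contact", "sign_up"])]

-- A's business_type → funnel selection (the 'both' branch written as the literal dict A builds)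
def pvFunnelFor (business_type : String) : List (String × List String) :=
  if business_type == "ecommerce" then pvEcomFunnel
  else if business_type == "lead_gen" then pvLeadGenFunnel
  else
    [("upper", ["view_item", "view_item_list"] ++ ["page_view", "view_content"]),
     ("mid", ["add_to_cart", "begin_checkout", "add_payment_info"] ++ ["form_start", "phone_call"]),
     ("bottom", ["purchase"] ++ ["generate_lead", "contact", "sign_up"])]

-- a["name"].lower().replace(" ", "_"); a["name"] raises KeyError when absent — excluded by Pre_
def pvName (a : List (String × String)) : String :=
  PySem.Str.replace (PySem.Str.lower (((PySem.Dict.mk a).get? "name").getD "")) " " "_"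

def check_missing_funnel_events_py (actions : List (List (String × String))) (business_type : String) : List (String × List String) :=
  let funnel := pvFunnelFor business_type
  let action_names_lower := actions.map (fun a => pvName a)
  let missing := funnel.foldl
    (fun d pr => pr.2.foldl
      (fun d event =>
        if !(action_names_lower.any fun name => PySem.Str.isIn event name) then
          d.modify pr.1 [] (fun l => l ++ [event])
        else d) d)
    (PySem.Dict.mk [("upper", ([] : List String)), ("mid", []), ("bottom", [])])
  missing.items

-- ===== PORT B =====
-- B's name normalisation (same expression as in Source B)
def bNorm (a : List (String × String)) : String :=
  PySem.Str.replace (PySem.Str.lower (((PySem.Dict.mk a).get? "name").getD "")) " " "_"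

-- B's funnel selection: the 'both' branch is Source B's dict comprehension over the key tuple
def bFunnel (business_type : String) : List (String × List String) :=
  if business_type == "ecommerce" then pvEcomFunnel
  else if business_type == "lead_gen" then pvLeadGenFunnel
  else
    (["upper", "mid", "bottom"]).map (fun k =>
      (k, (PySem.Dict.mk pvEcomFunnel).getD k [] ++ (PySem.Dict.mk pvLeadGenFunnel).getD k []))

def check_missing_funnel_events_py_alt (actions : List (List (String × String))) (business_type : String) : List (String × List String) :=
  let funnel := bFunnel business_type
  let present := actions.foldl
    (fun present a =>
      let name := bNorm a
      (funnel.map Prod.snd).foldl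
        (fun present evs =>
          evs.foldl
            (fun present e => if PySem.Str.isIn e name then PySem.Set.add present e else present)
            present)
        present)
    PySem.Set.empty
  funnel.map (fun pr => (pr.1, pr.2.filter (fun e => !(present.contains e))))

-- ===== PRECONDITION & SPEC =====
-- Pre_ excludes exactly the inputs where some action dict lacks the key "name": there A raises KeyError.
def Pre_check_missing_funnel_events_py (actions : List (List (String × String))) (business_type : String) : Prop :=
  actions.all (fun a => (PySem.Dict.mk a).contains "name") = true
instance (actions : List (List (String × String))) (business_type : String) : Decidable (Pre_check_missing_funnel_events_py actions business_type) := by unfold Pre_check_missing_funnel_events_py; infer_instance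

def pvWitness_check_missing_funnel_events_py : (List (List (String × String))) × String :=
  ([[("name", "View Item")], [("name", "purchase now")]], "ecommerce")

def Spec_check_missing_funnel_events_py (actions : List (List (String × String))) (business_type : String) (out : List (String × List String)) : Prop := out = check_missing_funnel_events_py_alt actions business_type
instance (actions : List (List (String × String))) (business_type : String) (out : List (String × List String)) : Decidable (Spec_check_missing_funnel_events_py actions business_type out) := by unfold Spec_check_missing_funnel_events_py; infer_instance

-- ===== CLAIM (what is proved, stated in full; the proofs are below) =====
def Claim_equal_check_missing_funnel_events_py : Prop := ∀ (actions : List (List (String × String))) (business_type : String), Dom_check_missing_funnel_events_py actions business_type → Pre_check_missing_funnel_events_py actions business_type → Spec_check_missing_funnel_events_py actions business_type (check_missing_funnel_events_py actions business_type)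

-- ===== LEMMAS AND PROOFS =====

-- A's inner loop over one level's events, abstracted over the append condition p
theorem pv_inner (p : String → Bool) (lv : String) (evs : List String)
    (d : PySem.Dict String (List String)) (hnd : d.keys.Nodup) (hc : d.contains lv = true) :
    (evs.foldl (fun d e => if p e then d.modify lv [] (fun l => l ++ [e]) else d) d).items
      = d.items.map (fun pr => if pr.1 == lv then (pr.1, pr.2 ++ evs.filter p) else pr) := by
  induction evs generalizing d with
  | nil =>
    simp only [List.foldl_nil, List.filter_nil, List.append_nil]
    exact (List.map_id'' (fun pr => by split <;> rfl) _).symm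
  | cons e evs ih =>
    simp only [List.foldl_cons]
    by_cases hp : p e
    · simp only [hp, if_pos]
      have hmod : d.modify lv [] (fun l => l ++ [e]) = d.insert lv (d.getD lv [] ++ [e]) := rfl
      rw [hmod]
      have hkeys := PySem.Dict.keys_insert_of_contains d (d.getD lv [] ++ [e]) hc
      have hnd' : (d.insert lv (d.getD lv [] ++ [e])).keys.Nodup := by rw [hkeys]; exact hnd
      have hc' : (d.insert lv (d.getD lv [] ++ [e])).contains lv = true := by
        rw [PySem.Dict.contains_insert]; simp
      rw [ih _ hnd' hc', PySem.Dict.items_insert_of_contains d _ hc, List.map_map]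
      refine List.map_congr_left (fun pr hpr => ?_)
      by_cases hk : pr.1 = lv
      · have hv : d.getD lv [] = pr.2 := by
          have := PySem.Dict.get?_of_mem_items d (k := pr.1) (v := pr.2) (by simpa using hpr) hnd
          rw [PySem.Dict.getD_eq_get?_getD, ← hk, this]; rfl
        simp [hk, hv, hp]
      · simp [hk]
    · simp only [hp, if_neg, Bool.false_eq_true, not_false_iff]
      rw [ih d hnd hc]
      refine List.map_congr_left (fun pr hpr => ?_)
      simp [hp]

-- A's outer loop over the funnel levels
theorem pv_outer (p : String → Bool) (fl : List (String × List String))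
    (d : PySem.Dict String (List String)) (hnd : d.keys.Nodup)
    (hfl : (fl.map Prod.fst).Nodup) (hc : ∀ pr ∈ fl, d.contains pr.1 = true) :
    (fl.foldl (fun d pr => pr.2.foldl
        (fun d e => if p e then d.modify pr.1 [] (fun l => l ++ [e]) else d) d) d).items
      = d.items.map (fun pr =>
          match fl.find? (fun q => q.1 == pr.1) with
          | some q => (pr.1, pr.2 ++ q.2.filter p)
          | none => pr) := by
  induction fl generalizing d with
  | nil =>
    simp only [List.foldl_nil, List.find?_nil]
    exact (List.map_id'' (fun pr => rfl) _).symm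
  | cons hd fl ih =>
    simp only [List.foldl_cons]
    have hitems := pv_inner p hd.1 hd.2 d hnd (hc hd (by simp))
    set d' := hd.2.foldl (fun d e => if p e then d.modify hd.1 [] (fun l => l ++ [e]) else d) d with hd'
    have hkeys' : d'.keys = d.keys := by
      show d'.items.map Prod.fst = d.items.map Prod.fst
      rw [hitems, List.map_map]
      refine List.map_congr_left (fun pr hpr => ?_)
      by_cases hk : pr.1 = hd.1 <;> simp [hk]
    have hnd' : d'.keys.Nodup := by rw [hkeys']; exact hnd
    have hc' : ∀ pr ∈ fl, d'.contains pr.1 = true := by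
      intro pr hpr
      rw [PySem.Dict.contains_iff_mem_keys, hkeys', ← PySem.Dict.contains_iff_mem_keys]
      exact hc pr (by simp [hpr])
    have hfl2 : (hd.1 :: fl.map Prod.fst).Nodup := by simpa using hfl
    have hhd : hd.1 ∉ fl.map Prod.fst := (List.nodup_cons.mp hfl2).1
    rw [ih d' hnd' (List.nodup_cons.mp hfl2).2 hc', hitems, List.map_map]
    refine List.map_congr_left (fun pr hpr => ?_)
    by_cases hk : pr.1 = hd.1
    · have hnone : fl.find? (fun q => q.1 == pr.1) = none := by
        rw [List.find?_eq_none]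
        intro q hq
        simp only [beq_iff_eq]
        intro hcontra
        exact hhd (hk ▸ hcontra ▸ List.mem_map_of_mem hq)
      rw [hk] at hnone
      simp [hk, hnone]
    · have hne2 : (hd.1 == pr.1) = false := by
        simp only [beq_eq_false_iff_ne]; exact fun h => hk h.symm
      simp [hk, hne2]

-- B's innermost loop: one event list added into the set under condition p
theorem pv_addlist (p : String → Bool) (evs : List String) (s : PySem.Set String) (x : String) :
    (evs.foldl (fun s e => if p e then PySem.Set.add s e else s) s).contains x
      = (s.contains x || (decide (x ∈ evs) && p x)) := by
  induction evs generalizing s with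
  | nil => simp
  | cons e evs ih =>
    simp only [List.foldl_cons]
    by_cases hp : p e
    · rw [if_pos hp, ih]
      have hadd : (PySem.Set.add s e).contains x = (s.contains x || x == e) := by
        rw [Bool.eq_iff_iff]
        simp only [Bool.or_eq_true, beq_iff_eq, PySem.Set.contains_iff, PySem.Set.mem_add]
      rw [hadd]
      by_cases hx : x = e
      · subst hx; simp [hp]
      · have : (x == e) = false := by simpa using hx
        simp [this, hx]
    · rw [if_neg hp, ih]
      by_cases hx : x = e
      · subst hx; simp [hp]
      · simp [hx]

-- B's middle loop: all the level lists of the funnel added into the set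
theorem pv_addlevels (p : String → Bool) (fls : List (List String)) (s : PySem.Set String) (x : String) :
    (fls.foldl (fun s evs => evs.foldl (fun s e => if p e then PySem.Set.add s e else s) s) s).contains x
      = (s.contains x || (decide (x ∈ fls.flatten) && p x)) := by
  induction fls generalizing s with
  | nil => simp
  | cons evs fls ih =>
    simp only [List.foldl_cons]
    rw [ih, pv_addlist]
    by_cases hx : x ∈ evs <;> by_cases hx2 : x ∈ fls.flatten <;>
      simp [hx, hx2, Bool.or_comm]

-- B's 'present' set characterised over the pass on actions
theorem pv_present (fls : List (List String)) (actions : List (List (String × String)))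
    (s : PySem.Set String) (x : String) :
    (actions.foldl
        (fun s a => fls.foldl
          (fun s evs => evs.foldl
            (fun s e => if PySem.Str.isIn e (bNorm a) then PySem.Set.add s e else s) s) s) s).contains x
      = (s.contains x || (decide (x ∈ fls.flatten) && actions.any (fun a => PySem.Str.isIn x (bNorm a)))) := by
  induction actions generalizing s with
  | nil => simp
  | cons a acts ih =>
    simp only [List.foldl_cons, List.any_cons]
    rw [ih, pv_addlevels]
    cases s.contains x <;> cases hax : PySem.Str.isIn x (bNorm a) <;>
      cases decide (x ∈ fls.flatten) <;> simp

-- the per-branch equality: A's loop and B's build-then-filter agree on any funnel with these keys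
theorem pv_branch (actions : List (List (String × String))) (fl : List (String × List String))
    (hkeys : fl.map Prod.fst = ["upper", "mid", "bottom"]) :
    (fl.foldl
      (fun d pr => pr.2.foldl
        (fun d event =>
          if !((actions.map (fun a => pvName a)).any fun name => PySem.Str.isIn event name) then
            d.modify pr.1 [] (fun l => l ++ [event])
          else d) d)
      (PySem.Dict.mk [("upper", ([] : List String)), ("mid", []), ("bottom", [])])).items
    = fl.map (fun pr => (pr.1,
        pr.2.filter (fun e => !((actions.foldl
          (fun s a => (fl.map Prod.snd).foldl
            (fun s evs => evs.foldl
              (fun s e => if PySem.Str.isIn e (bNorm a) then PySem.Set.add s e else s) s) s)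
          PySem.Set.empty).contains e)))) := by
  set p : String → Bool := fun event => !((actions.map (fun a => pvName a)).any fun name => PySem.Str.isIn event name) with hp
  set d0 : PySem.Dict String (List String) := PySem.Dict.mk [("upper", ([] : List String)), ("mid", []), ("bottom", [])] with hd0
  have hnd : d0.keys.Nodup := by decide
  have hfl : (fl.map Prod.fst).Nodup := by rw [hkeys]; decide
  have hc : ∀ pr ∈ fl, d0.contains pr.1 = true := by
    intro pr hpr
    have hm : pr.1 ∈ fl.map Prod.fst := List.mem_map_of_mem hpr
    rw [hkeys] at hm
    simp only [List.mem_cons, List.not_mem_nil, or_false] at hm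
    rcases hm with h | h | h <;> rw [hd0, h] <;> decide
  rw [pv_outer p fl d0 hnd hfl hc]
  match fl, hkeys with
  | [(k1, e1), (k2, e2), (k3, e3)], hkeys =>
    simp only [List.map_cons, List.map_nil, List.cons.injEq, and_true] at hkeys
    obtain ⟨h1, h2, h3⟩ := hkeys
    subst h1; subst h2; subst h3
    simp only [hd0, List.map_cons, List.map_nil, List.find?_cons]
    have hfilter : ∀ (evs : List String), (∀ x ∈ evs, x ∈ ([e1, e2, e3] : List (List String)).flatten) →
        evs.filter (fun e => !((actions.foldl
          (fun s a => ([e1, e2, e3] : List (List String)).foldl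
            (fun s evs => evs.foldl
              (fun s e => if PySem.Str.isIn e (bNorm a) then PySem.Set.add s e else s) s) s)
          PySem.Set.empty).contains e)) = evs.filter p := by
      intro evs hsub
      refine List.filter_congr (fun e he => ?_)
      rw [pv_present]
      have hm : decide (e ∈ ([e1, e2, e3] : List (List String)).flatten) = true := by
        simpa using hsub e he
      simp only [hm, Bool.true_and, hp, pvName, bNorm, List.any_map, Function.comp_def]
      simp
    rw [hfilter e1 (fun x hx => by simp [hx]), hfilter e2 (fun x hx => by simp [hx]),
        hfilter e3 (fun x hx => by simp [hx])]
    simp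

theorem pv_funnel_keys (bt : String) : (pvFunnelFor bt).map Prod.fst = ["upper", "mid", "bottom"] := by
  unfold pvFunnelFor
  split <;> first | rfl | (split <;> rfl)

-- B's and A's funnel selections produce the same association list
theorem pv_funnel_eq (bt : String) : bFunnel bt = pvFunnelFor bt := by
  unfold bFunnel pvFunnelFor
  split
  · rfl
  · split <;> rfl

-- ===== VERDICT (by name: the statement is the Claim_ definition above) =====
theorem check_missing_funnel_events_py_spec : Claim_equal_check_missing_funnel_events_py := by
  intro actions business_type _ _
  unfold Spec_check_missing_funnel_events_py
  unfold check_missing_funnel_events_py check_missing_funnel_events_py_alt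
  rw [pv_funnel_eq]
  exact pv_branch actions (pvFunnelFor business_type) (pv_funnel_keys business_type)
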